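-- pv_equiv track=rewrite | github.com/venkat0001-sudo/trail2learn | docx_parser.py | is_bitfield_header
-- ===== SOURCE A (Python) =====
-- BITFIELD_HEADER_TOKENS = {
--     # Data width descriptors
--     "dword", "word", "byte", "bytes",
--     # Bit position descriptors
--     "bit", "bits", "bit position", "bit range",
--     # Field-layout descriptors
--     "offset", "offset start", "offset end", "field", "register",
--     # Value tables (Identify Controller sub-tables)
--     "value", "size", "size (bytes)",
--     # Measurement parameter tables (shock/vibration)
--     "half-sine pulse duration", "pulse peak level spec",
--     "half-sine pulse duration (ms)", "pulse peak level spec (g)",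
--     # Form factor sub-tables
--     "form factor", "max weight", "form factor description",
-- }
--
-- def is_bitfield_header(text: str) -> bool:
--     """
--     Return True if the given cell text looks like a bit-field table header.
--     Case-insensitive, whitespace-tolerant.
--     """
--     if not text:
--         return False
--     normalized = " ".join(text.strip().lower().split())
--     if normalized in BITFIELD_HEADER_TOKENS:
--         return True
--     # Also catch headers that start with these tokens followed by more text
--     for token in BITFIELD_HEADER_TOKENS:
--         if normalized.startswith(token + " ") or normalized.startswith(token + ":"):
--             return True
--     return False
-- ===== SOURCE B (Python) =====
-- BITFIELD_HEADER_TOKENS = {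
--     "dword", "word", "byte", "bytes",
--     "bit", "bits", "bit position", "bit range",
--     "offset", "offset start", "offset end", "field", "register",
--     "value", "size", "size (bytes)",
--     "half-sine pulse duration", "pulse peak level spec",
--     "half-sine pulse duration (ms)", "pulse peak level spec (g)",
--     "form factor", "max weight", "form factor description",
-- }
--
-- def is_bitfield_header(text: str) -> bool:
--     # No empty-text guard needed: "" normalizes to "" which matches nothing.
--     normalized = " ".join(text.strip().lower().split())
--     # Single left-to-right pass with a growing prefix accumulator: a header
--     # token match must end exactly at a space or colon boundary.
--     prefix = ""
--     for ch in normalized: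
--         if ch in " :" and prefix in BITFIELD_HEADER_TOKENS:
--             return True
--         prefix += ch
--     return normalized in BITFIELD_HEADER_TOKENS
-- ===== Notes on version B (the rewrite author's own statement) =====
-- stated objective: alternative
-- what changed: Instead of guarding empty input, testing whole-string membership first and then scanning every header token as a candidate prefix with startswith, B makes one left-to-right pass over the normalized string with a growing prefix accumulator, testing the accumulated prefix for set membership at each space/colon boundary, with the whole-string membership test last.
import Mathlib
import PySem

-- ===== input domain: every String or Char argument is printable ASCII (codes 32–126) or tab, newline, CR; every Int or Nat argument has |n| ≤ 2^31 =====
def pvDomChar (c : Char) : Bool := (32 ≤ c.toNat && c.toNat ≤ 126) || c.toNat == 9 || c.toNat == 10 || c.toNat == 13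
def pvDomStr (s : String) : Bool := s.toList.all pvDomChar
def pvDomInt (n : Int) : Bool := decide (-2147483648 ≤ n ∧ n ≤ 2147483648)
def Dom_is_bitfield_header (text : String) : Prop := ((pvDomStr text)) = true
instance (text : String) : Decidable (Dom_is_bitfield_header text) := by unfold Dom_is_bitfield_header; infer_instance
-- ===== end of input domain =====

-- B replaces A's per-token startswith scan (and its empty-text guard) by one left-to-right pass
-- over the normalized string with a growing prefix accumulator, testing the prefix for set
-- membership at each space/colon boundary (alternative decomposition, same cost class).

-- the module-level set BITFIELD_HEADER_TOKENS (a Python set of string literals)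
def pvTokens : PySem.Set String := PySem.Set.ofList
  ["dword", "word", "byte", "bytes",
   "bit", "bits", "bit position", "bit range",
   "offset", "offset start", "offset end", "field", "register",
   "value", "size", "size (bytes)",
   "half-sine pulse duration", "pulse peak level spec",
   "half-sine pulse duration (ms)", "pulse peak level spec (g)",
   "form factor", "max weight", "form factor description"]

-- ===== PORT A =====
def is_bitfield_header (text : String) : Bool :=
  if text == "" then false
  else
    let normalized := PySem.Str.join " " (PySem.Str.split₀ (PySem.Str.lower (PySem.Str.strip text)))
    if pvTokens.contains normalized then true
    else
      -- for token in BITFIELD_HEADER_TOKENS: … return True  (order-independent: any)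
      pvTokens.any (fun token =>
        PySem.Str.startswith normalized (token ++ " ") || PySem.Str.startswith normalized (token ++ ":"))

-- ===== PORT B =====
-- the for-loop of B: prefix accumulator, early return True at a matching boundary
def pvPrefixScan (pref : List Char) (rest : List Char) : Bool :=
  match rest with
  | [] => false
  | ch :: cs =>
    if (ch == ' ' || ch == ':') && pvTokens.contains (String.ofList pref) then true
    else pvPrefixScan (pref ++ [ch]) cs

def is_bitfield_header_alt (text : String) : Bool :=
  let normalized := PySem.Str.join " " (PySem.Str.split₀ (PySem.Str.lower (PySem.Str.strip text)))
  pvPrefixScan [] normalized.toList || pvTokens.contains normalized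

-- ===== PRECONDITION & SPEC =====
def Spec_is_bitfield_header (text : String) (out : Bool) : Prop := out = is_bitfield_header_alt text
instance (text : String) (out : Bool) : Decidable (Spec_is_bitfield_header text out) := by unfold Spec_is_bitfield_header; infer_instance

-- ===== CLAIM (what is proved, stated in full; the proofs are below) =====
def Claim_equal_is_bitfield_header : Prop := ∀ (text : String), Dom_is_bitfield_header text → Spec_is_bitfield_header text (is_bitfield_header text)

-- ===== LEMMAS AND PROOFS =====

-- (p ++ [c]) is a prefix of l iff l has c at position p.length and p before it
lemma pv_prefix_snoc (p : List Char) (c : Char) (l : List Char) :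
    (p ++ [c]) <+: l ↔ l[p.length]? = some c ∧ l.take p.length = p := by
  constructor
  · rintro ⟨r, rfl⟩
    constructor
    · rw [List.append_assoc, List.getElem?_append_right (le_refl _)]
      simp
    · rw [List.append_assoc, List.take_left]
  · rintro ⟨hc, ht⟩
    have : l.take (p.length + 1) = p ++ [c] := by
      rw [List.take_add_one, ht, hc]
      rfl
    rw [← this]
    exact List.take_prefix _ _

-- B's loop hits a matching boundary iff some position k of rest holds ' ' or ':' with the
-- accumulated prefix before it in the token set
lemma pvPrefixScan_iff (rest pref : List Char) :
    pvPrefixScan pref rest = true ↔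
      ∃ k, ∃ h : k < rest.length, (rest[k] = ' ' ∨ rest[k] = ':') ∧
        pvTokens.contains (String.ofList (pref ++ rest.take k)) = true := by
  induction rest generalizing pref with
  | nil => simp [pvPrefixScan]
  | cons c cs ih =>
    rw [pvPrefixScan]
    by_cases hc : ((c == ' ' || c == ':') && pvTokens.contains (String.ofList pref)) = true
    · simp only [if_pos hc, true_iff]
      simp only [Bool.and_eq_true, Bool.or_eq_true, beq_iff_eq] at hc
      exact ⟨0, Nat.succ_pos _, by simpa using hc.1, by simpa using hc.2⟩
    · simp only [if_neg hc, ih]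
      constructor
      · rintro ⟨k, h, hch, hmem⟩
        refine ⟨k + 1, Nat.succ_lt_succ h, by simpa using hch, ?_⟩
        simpa [List.append_assoc] using hmem
      · rintro ⟨k, h, hch, hmem⟩
        match k with
        | 0 =>
          exfalso
          apply hc
          simp only [Bool.and_eq_true, Bool.or_eq_true, beq_iff_eq]
          exact ⟨by simpa using hch, by simpa using hmem⟩
        | k' + 1 =>
          refine ⟨k', Nat.lt_of_succ_lt_succ h, by simpa using hch, ?_⟩
          simpa [List.append_assoc] using hmem

-- A's fallback scan over tokens equals B's boundary scan over the string
lemma pv_scan_eq (norm : String) :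
    pvTokens.any (fun token =>
        PySem.Str.startswith norm (token ++ " ") || PySem.Str.startswith norm (token ++ ":"))
    = pvPrefixScan [] norm.toList := by
  rw [Bool.eq_iff_iff, List.any_eq_true, pvPrefixScan_iff]
  constructor
  · rintro ⟨t, ht, hstart⟩
    simp only [Bool.or_eq_true, PySem.Str.startswith_eq, PySem.Chars.startswith_iff,
      String.toList_append] at hstart
    have hex : ∃ c, (c = ' ' ∨ c = ':') ∧ (t.toList ++ [c]) <+: norm.toList := by
      rcases hstart with h | h
      · exact ⟨' ', Or.inl rfl, by simpa using h⟩
      · exact ⟨':', Or.inr rfl, by simpa using h⟩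
    obtain ⟨c, hc, hpre⟩ := hex
    obtain ⟨hget, htake⟩ := (pv_prefix_snoc _ _ _).mp hpre
    obtain ⟨hlt, hval⟩ := List.getElem?_eq_some_iff.mp hget
    refine ⟨t.toList.length, hlt, by rw [hval]; exact hc, ?_⟩
    rw [List.nil_append, htake, String.ofList_toList]
    simpa using ht
  · rintro ⟨k, h, hch, hmem⟩
    set t := String.ofList (([] : List Char) ++ norm.toList.take k) with htdef
    refine ⟨t, by simpa using hmem, ?_⟩
    have hsl : t.toList = norm.toList.take k := by
      rw [htdef, List.nil_append, String.toList_ofList]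
    have hpre : (norm.toList.take k ++ [norm.toList[k]]) <+: norm.toList := by
      rw [pv_prefix_snoc]
      constructor
      · rw [List.length_take, Nat.min_eq_left h.le, List.getElem?_eq_getElem h]
      · rw [List.length_take, Nat.min_eq_left h.le]
    simp only [Bool.or_eq_true, PySem.Str.startswith_eq, PySem.Chars.startswith_iff,
      String.toList_append]
    rcases hch with hc | hc
    · left
      rw [hc] at hpre
      rw [hsl]
      simpa using hpre
    · right
      rw [hc] at hpre
      rw [hsl]
      simpa using hpre

-- ===== VERDICT (by name: the statement is the Claim_ definition above) =====
theorem is_bitfield_header_spec : Claim_equal_is_bitfield_header := by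
  intro text _
  unfold Spec_is_bitfield_header is_bitfield_header is_bitfield_header_alt
  by_cases h1 : text == ""
  · rw [if_pos h1]
    have he : text = "" := by simpa using h1
    subst he
    decide
  · rw [if_neg h1]
    set n := PySem.Str.join " " (PySem.Str.split₀ (PySem.Str.lower (PySem.Str.strip text))) with hn
    by_cases h2 : pvTokens.contains n = true
    · have h2' : n ∈ pvTokens := by simpa using h2
      rw [if_pos h2]
      simp only [h2, Bool.or_true]
    · have hc : pvTokens.contains n = false := by simpa using h2
      rw [if_neg h2, pv_scan_eq]
      simp only [hc, Bool.or_false]
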